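-- pv_equiv track=rewrite | github.com/Kyler-S/ComputerProgrammingUltimatePythonRepository | 06ListsAndLoops/Assignment/main.py | sum_with_skips
-- ===== SOURCE A (Python) =====
-- def sum_with_skips(list):
--     total = 0
--     ignoring = False
--     for num in list:
--         if num == -1:
--             ignoring = not ignoring
--         elif not ignoring:
--             total = total + num
--     return total
-- ===== SOURCE B (Python) =====
-- def sum_with_skips(list):
--     segments = [[]]
--     for num in list:
--         if num == -1:
--             segments.append([])
--         else:
--             segments[-1].append(num)
--     return sum(sum(seg) for i, seg in enumerate(segments) if i % 2 == 0)
-- ===== Notes on version B (the rewrite author's own statement) =====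
-- stated objective: alternative
-- what changed: Replaces the running boolean toggle with a partition-then-aggregate decomposition: one pass splits the list into segments at each -1 delimiter, then only the even-indexed segments are summed.
import Mathlib
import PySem

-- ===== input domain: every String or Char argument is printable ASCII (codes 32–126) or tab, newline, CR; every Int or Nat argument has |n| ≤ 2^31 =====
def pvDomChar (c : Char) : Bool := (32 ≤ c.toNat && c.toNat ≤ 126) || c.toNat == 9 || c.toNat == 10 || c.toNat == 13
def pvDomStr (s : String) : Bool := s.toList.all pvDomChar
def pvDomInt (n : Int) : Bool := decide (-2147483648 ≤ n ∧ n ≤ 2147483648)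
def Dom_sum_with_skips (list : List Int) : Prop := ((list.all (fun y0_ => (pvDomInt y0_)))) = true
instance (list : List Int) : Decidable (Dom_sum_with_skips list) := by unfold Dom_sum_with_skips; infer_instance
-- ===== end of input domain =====

-- B replaces A's running boolean toggle by splitting the list into segments at each -1
-- and summing the even-indexed segments (objective: alternative decomposition, same cost).

-- ===== PORT A =====
def sum_with_skips (list : List Int) : Int :=
  (list.foldl
    (fun (st : Int × Bool) num =>
      if num == -1 then (st.1, !st.2)
      else if !st.2 then (st.1 + num, st.2)
      else st)
    (0, false)).1

-- ===== PORT B =====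
-- segments[-1].append(num): append num to the last segment
def pvAppendLast (segs : List (List Int)) (x : Int) : List (List Int) :=
  match segs with
  | [] => []
  | [s] => [s ++ [x]]
  | s :: rest => s :: pvAppendLast rest x

def sum_with_skips_alt (list : List Int) : Int :=
  let segments := list.foldl
    (fun segs num => if num == -1 then segs ++ [[]] else pvAppendLast segs num) [[]]
  (((PySem.List.enumerate segments 0).filter (fun p => p.1 % 2 == 0)).map
    (fun p => p.2.sum)).sum

-- ===== PRECONDITION & SPEC =====
def Spec_sum_with_skips (list : List Int) (out : Int) : Prop := out = sum_with_skips_alt list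
instance (list : List Int) (out : Int) : Decidable (Spec_sum_with_skips list out) := by unfold Spec_sum_with_skips; infer_instance

-- ===== CLAIM (what is proved, stated in full; the proofs are below) =====
def Claim_equal_sum_with_skips : Prop := ∀ (list : List Int), Dom_sum_with_skips list → Spec_sum_with_skips list (sum_with_skips list)

-- ===== LEMMAS AND PROOFS =====

-- sum of the even-indexed (relative to start s) segments
def pvG (s : Int) (segs : List (List Int)) : Int :=
  (((PySem.List.enumerate segs s).filter (fun p => p.1 % 2 == 0)).map
    (fun p => p.2.sum)).sum

theorem pvG_nil (s : Int) : pvG s [] = 0 := by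
  simp [pvG, PySem.List.enumerate_nil]

theorem pvG_cons (s : Int) (seg : List Int) (rest : List (List Int)) :
    pvG s (seg :: rest) = (if s % 2 = 0 then seg.sum else 0) + pvG (s + 1) rest := by
  by_cases h : s % 2 = 0 <;>
    simp [pvG, PySem.List.enumerate_cons, h]

theorem pvAppendLast_length (segs : List (List Int)) (x : Int) :
    (pvAppendLast segs x).length = segs.length := by
  induction segs with
  | nil => rfl
  | cons s rest ih =>
    cases rest with
    | nil => rfl
    | cons a b => simpa [pvAppendLast] using ih

theorem pvG_append_empty (s : Int) (segs : List (List Int)) :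
    pvG s (segs ++ [[]]) = pvG s segs := by
  induction segs generalizing s with
  | nil => simp [pvG_nil, pvG_cons]
  | cons a rest ih => simp [pvG_cons, ih]

theorem pvG_appendLast (s : Int) (segs : List (List Int)) (x : Int) (h : segs ≠ []) :
    pvG s (pvAppendLast segs x)
      = pvG s segs + (if (s + segs.length - 1) % 2 = 0 then x else 0) := by
  induction segs generalizing s with
  | nil => exact absurd rfl h
  | cons a rest ih =>
    cases rest with
    | nil =>
      simp only [pvAppendLast, pvG_cons, pvG_nil, List.sum_append, List.length_cons,
        List.length_nil]
      split_ifs with h1 h2 <;> simp_all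
    | cons b c =>
      have hne : (b :: c) ≠ [] := by simp
      simp only [pvAppendLast, pvG_cons, ih (s + 1) hne, List.length_cons]
      push_cast
      split_ifs <;> try (exfalso; omega)
      all_goals ring

-- the loop invariant: A's (total, ignoring) state tracks B's segment list
theorem pv_main (l : List Int) :
    ∀ (segs : List (List Int)) (total : Int), segs ≠ [] → pvG 0 segs = total →
    (l.foldl
      (fun (st : Int × Bool) num =>
        if num == -1 then (st.1, !st.2)
        else if !st.2 then (st.1 + num, st.2)
        else st)
      (total, decide (segs.length % 2 = 0))).1
    = pvG 0 (l.foldl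
        (fun segs num => if num == -1 then segs ++ [[]] else pvAppendLast segs num) segs) := by
  induction l with
  | nil => intro segs total _ h2; simpa using h2.symm
  | cons x xs ih =>
    intro segs total hne h2
    by_cases hx : x = -1
    · have hpar : (!decide (segs.length % 2 = 0))
          = decide ((segs ++ [[]]).length % 2 = 0) := by
        simp only [List.length_append, List.length_cons, List.length_nil]
        by_cases hp : segs.length % 2 = 0 <;> simp [hp] <;> omega
      simp only [List.foldl_cons, hx, beq_self_eq_true, if_true]
      rw [hpar]
      exact ih (segs ++ [[]]) total (by simp) (by rw [pvG_append_empty]; exact h2)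
    · have hb : (x == (-1 : Int)) = false := by simp [hx]
      have hlen := pvAppendLast_length segs x
      have hne' : pvAppendLast segs x ≠ [] := by
        intro hc; apply hne
        have := hlen; rw [hc] at this; exact List.length_eq_zero_iff.mp this.symm
      have hG := pvG_appendLast 0 segs x hne
      have hlpos : 1 ≤ segs.length := by
        cases segs with | nil => exact absurd rfl hne | cons a b => simp
      simp only [List.foldl_cons, hb, Bool.false_eq_true, if_false]
      by_cases hp : segs.length % 2 = 0
      · -- even number of segments => last index odd => ignoring
        have hif : ((0 : Int) + segs.length - 1) % 2 ≠ 0 := by omega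
        have hdt : decide (segs.length % 2 = 0) = true := by simp [hp]
        rw [hdt]
        simp only [Bool.not_true, Bool.false_eq_true, if_false]
        have h4 := ih (pvAppendLast segs x) total hne'
          (by rw [hG, if_neg hif, add_zero]; exact h2)
        rw [hlen, hdt] at h4
        exact h4
      · have hif : ((0 : Int) + segs.length - 1) % 2 = 0 := by omega
        have hdf : decide (segs.length % 2 = 0) = false := by simp [hp]
        rw [hdf]
        simp only [Bool.not_false, if_true]
        have h4 := ih (pvAppendLast segs x) (total + x) hne'
          (by rw [hG, if_pos hif, h2])
        rw [hlen, hdf] at h4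
        exact h4

-- ===== VERDICT (by name: the statement is the Claim_ definition above) =====
theorem sum_with_skips_spec : Claim_equal_sum_with_skips := by
  intro list _
  unfold Spec_sum_with_skips sum_with_skips sum_with_skips_alt
  have := pv_main list [[]] 0 (by simp) (by simp [pvG_cons, pvG_nil])
  simpa [pvG] using this
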